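-- pv_equiv track=rewrite | github.com/yuka9611/GenshinTextSearch | server/dbBuild/versioning.py | _normalize_version_catalog_tables
-- ===== SOURCE A (Python) =====
-- VERSION_SOURCE_TABLES: tuple[str, ...] = ("textMap", "quest", "subtitle", "readable")
--
-- def _normalize_version_catalog_tables(
--     source_tables: tuple[str, ...] | list[str] | None = None,
-- ) -> list[str]:
--     allowed = set(VERSION_SOURCE_TABLES)
--     if source_tables is None:
--         return list(VERSION_SOURCE_TABLES)
--     normalized: list[str] = []
--     seen: set[str] = set()
--     for raw in source_tables:
--         table_name = str(raw).strip()
--         if table_name not in allowed or table_name in seen: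
--             continue
--         seen.add(table_name)
--         normalized.append(table_name)
--     return normalized
-- ===== SOURCE B (Python) =====
-- VERSION_SOURCE_TABLES: tuple[str, ...] = ("textMap", "quest", "subtitle", "readable")
--
-- def _normalize_version_catalog_tables(
--     source_tables: tuple[str, ...] | list[str] | None = None,
-- ) -> list[str]:
--     if source_tables is None:
--         return list(VERSION_SOURCE_TABLES)
--     stripped = [str(raw).strip() for raw in source_tables]
--     hits = [(stripped.index(t), t) for t in VERSION_SOURCE_TABLES if t in stripped]
--     hits.sort(key=lambda p: p[0])
--     return [t for _, t in hits]
-- ===== Notes on version B (the rewrite author's own statement) =====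
-- stated objective: alternative
-- what changed: B inverts the iteration: instead of scanning the input with a seen-set accumulator, it iterates over the four allowed table names, looks up each one's first-occurrence index in the stripped input, and sorts the hits by that index; correct because A's output is exactly the allowed names present in the stripped input, ordered by first occurrence.
import Mathlib
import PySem

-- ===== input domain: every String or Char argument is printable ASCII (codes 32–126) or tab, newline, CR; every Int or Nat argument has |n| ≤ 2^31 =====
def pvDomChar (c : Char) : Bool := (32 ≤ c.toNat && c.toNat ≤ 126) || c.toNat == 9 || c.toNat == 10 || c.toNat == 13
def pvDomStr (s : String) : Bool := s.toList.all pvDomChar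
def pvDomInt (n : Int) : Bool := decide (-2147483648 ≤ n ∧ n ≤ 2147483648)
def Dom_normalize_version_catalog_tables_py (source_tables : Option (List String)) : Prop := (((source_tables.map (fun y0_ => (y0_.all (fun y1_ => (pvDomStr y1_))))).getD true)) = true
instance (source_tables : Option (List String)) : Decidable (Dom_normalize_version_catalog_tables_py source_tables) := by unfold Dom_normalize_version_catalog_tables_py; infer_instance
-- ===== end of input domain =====

-- B inverts the iteration: it looks up each of the four allowed names' first-occurrence index in the
-- stripped input and sorts the hits by index, instead of A's input scan with a seen-set (alternative; same value).
-- ===== PORT A =====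
def VERSION_SOURCE_TABLES : List String := ["textMap", "quest", "subtitle", "readable"]

-- the body of A's for-loop, as a named helper (same code, step for step)
def pvStepA (allowed : PySem.Set String) (st : List String × PySem.Set String) (raw : String) :
    List String × PySem.Set String :=
  let table_name := PySem.Str.strip raw
  if ¬ (PySem.Set.contains allowed table_name) ∨ PySem.Set.contains st.2 table_name then st
  else (st.1 ++ [table_name], PySem.Set.add st.2 table_name)

def normalize_version_catalog_tables_py (source_tables : Option (List String)) : List String :=
  let allowed : PySem.Set String := PySem.Set.ofList VERSION_SOURCE_TABLES
  match source_tables with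
  | none => VERSION_SOURCE_TABLES
  | some xs => (xs.foldl (pvStepA allowed) (([] : List String), PySem.Set.empty)).1

-- ===== PORT B =====
def normalize_version_catalog_tables_py_alt (source_tables : Option (List String)) : List String :=
  match source_tables with
  | none => VERSION_SOURCE_TABLES
  | some xs =>
    let stripped := xs.map (fun raw => PySem.Str.strip raw)
    let hits := (VERSION_SOURCE_TABLES.filter (fun t => stripped.contains t)).map
        (fun t => ((PySem.List.index? stripped t).getD 0, t))
    (PySem.List.sorted hits (fun p => p.1) false).map (fun p => p.2)

-- ===== PRECONDITION & SPEC =====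
def Spec_normalize_version_catalog_tables_py (source_tables : Option (List String)) (out : List String) : Prop := out = normalize_version_catalog_tables_py_alt source_tables
instance (source_tables : Option (List String)) (out : List String) : Decidable (Spec_normalize_version_catalog_tables_py source_tables out) := by unfold Spec_normalize_version_catalog_tables_py; infer_instance

-- ===== CLAIM (what is proved, stated in full; the proofs are below) =====
def Claim_equal_normalize_version_catalog_tables_py : Prop := ∀ (source_tables : Option (List String)), Dom_normalize_version_catalog_tables_py source_tables → Spec_normalize_version_catalog_tables_py source_tables (normalize_version_catalog_tables_py source_tables)

-- ===== LEMMAS AND PROOFS =====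

-- proof-only helper: the elements of ys that are new relative to the already-seen list s, in order
def pvDedupFrom (s : List String) : List String → List String
  | [] => []
  | y :: ys => if s.contains y then pvDedupFrom s ys else y :: pvDedupFrom (s ++ [y]) ys

theorem pvMem_dedupFrom (ys : List String) : ∀ (s : List String) (a : String),
    a ∈ pvDedupFrom s ys ↔ (a ∈ ys ∧ a ∉ s) := by
  induction ys with
  | nil => intro s a; simp [pvDedupFrom]
  | cons y ys ih =>
    intro s a
    by_cases h : y ∈ s
    · simp [pvDedupFrom, h, ih s a]
      intro ha; rintro rfl; exact absurd h (by simpa using ha)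
    · by_cases hay : a = y
      · subst hay; simp [pvDedupFrom, h]
      · simp [pvDedupFrom, h, hay, ih (s ++ [y]) a]

-- proof-only: first-occurrence index, total on members (getD 0 as in B's port)
def pvIdx (l : List String) (a : String) : Nat := (PySem.List.index? l a).getD 0

theorem pvIdx_cons_self (y : String) (ys : List String) : pvIdx (y :: ys) y = 0 := by
  rw [pvIdx, PySem.List.index?_cons_self]
  rfl

theorem pvIdx_cons_of_ne (y a : String) (ys : List String) (hne : a ≠ y) (hmem : a ∈ ys) :
    pvIdx (y :: ys) a = pvIdx ys a + 1 := by
  obtain ⟨i, hi⟩ := Option.isSome_iff_exists.mp ((PySem.List.index?_isSome_iff ys a).mpr hmem)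
  rw [pvIdx, pvIdx, PySem.List.index?_cons_of_ne ys (show y ≠ a from fun h => hne h.symm), hi]
  rfl

theorem pvPairwise_dedupFrom (ys : List String) : ∀ (s : List String),
    (pvDedupFrom s ys).Pairwise (fun a b => pvIdx ys a < pvIdx ys b) := by
  induction ys with
  | nil => intro s; simp [pvDedupFrom]
  | cons y ys ih =>
    intro s
    have hlift : ∀ (t : List String), (∀ a ∈ pvDedupFrom t ys, a ≠ y) →
        (pvDedupFrom t ys).Pairwise (fun a b => pvIdx (y :: ys) a < pvIdx (y :: ys) b) := by
      intro t hne
      refine (ih t).imp_of_mem ?_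
      intro a b ha hb hab
      rw [pvIdx_cons_of_ne y a ys (hne a ha) ((pvMem_dedupFrom ys t a).mp ha).1,
        pvIdx_cons_of_ne y b ys (hne b hb) ((pvMem_dedupFrom ys t b).mp hb).1]
      omega
    by_cases h : y ∈ s
    · simp only [pvDedupFrom, List.contains_eq_mem, h, decide_true, if_true]
      refine hlift s ?_
      intro a ha hay
      rw [hay] at ha
      exact ((pvMem_dedupFrom ys s y).mp ha).2 h
    · simp only [pvDedupFrom, List.contains_eq_mem, h, decide_false]
      refine List.Pairwise.cons ?_ (hlift (s ++ [y]) ?_)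
      · intro b hb
        have hbne : b ≠ y := by
          intro hby
          rw [hby] at hb
          exact ((pvMem_dedupFrom ys (s ++ [y]) y).mp hb).2 (by simp)
        rw [pvIdx_cons_self,
          pvIdx_cons_of_ne y b ys hbne ((pvMem_dedupFrom ys (s ++ [y]) b).mp hb).1]
        omega
      · intro a ha hay
        rw [hay] at ha
        exact ((pvMem_dedupFrom ys (s ++ [y]) y).mp ha).2 (by simp)

theorem pvLoop_eq (allowed : PySem.Set String) (xs : List String) :
    ∀ (acc seen seenD : List String),
    (∀ u, u ∈ seen ↔ (u ∈ allowed ∧ u ∈ seenD)) →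
    (xs.foldl (pvStepA allowed) (acc, seen)).1
      = acc ++ (pvDedupFrom seenD (xs.map (fun raw => PySem.Str.strip raw))).filter
          (fun t => PySem.Set.contains allowed t) := by
  induction xs with
  | nil => intro acc seen seenD _; simp [pvDedupFrom]
  | cons x xs ih =>
    intro acc seen seenD h
    rw [List.foldl_cons, List.map_cons]
    by_cases hd : PySem.Str.strip x ∈ seenD
    · have hstep : pvStepA allowed (acc, seen) x = (acc, seen) := by
        by_cases ha : PySem.Str.strip x ∈ allowed
        · have hs : PySem.Str.strip x ∈ seen := (h _).mpr ⟨ha, hd⟩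
          simp [pvStepA, hs]
        · simp [pvStepA, ha]
      have hdd : pvDedupFrom seenD (PySem.Str.strip x :: xs.map (fun raw => PySem.Str.strip raw))
          = pvDedupFrom seenD (xs.map (fun raw => PySem.Str.strip raw)) := by
        simp [pvDedupFrom, hd]
      rw [hstep, hdd]
      exact ih acc seen seenD h
    · by_cases ha : PySem.Str.strip x ∈ allowed
      · have hs : PySem.Str.strip x ∉ seen := fun hmem => hd ((h _).mp hmem).2
        have hstep : pvStepA allowed (acc, seen) x
            = (acc ++ [PySem.Str.strip x], seen ++ [PySem.Str.strip x]) := by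
          simp [pvStepA, ha, hs, PySem.Set.add]
        have hdd : (pvDedupFrom seenD (PySem.Str.strip x :: xs.map (fun raw => PySem.Str.strip raw))).filter
              (fun t => PySem.Set.contains allowed t)
            = PySem.Str.strip x ::
              (pvDedupFrom (seenD ++ [PySem.Str.strip x]) (xs.map (fun raw => PySem.Str.strip raw))).filter
                (fun t => PySem.Set.contains allowed t) := by
          simp [pvDedupFrom, hd, ha]
        have h' : ∀ u, u ∈ seen ++ [PySem.Str.strip x] ↔
            (u ∈ allowed ∧ u ∈ seenD ++ [PySem.Str.strip x]) := by
          intro u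
          by_cases hu : u = PySem.Str.strip x
          · subst hu; simp [ha]
          · simp [hu, h u]
        rw [hstep, hdd, ih (acc ++ [PySem.Str.strip x]) (seen ++ [PySem.Str.strip x])
          (seenD ++ [PySem.Str.strip x]) h']
        simp
      · have hstep : pvStepA allowed (acc, seen) x = (acc, seen) := by
          simp [pvStepA, ha]
        have hdd : (pvDedupFrom seenD (PySem.Str.strip x :: xs.map (fun raw => PySem.Str.strip raw))).filter
              (fun t => PySem.Set.contains allowed t)
            = (pvDedupFrom (seenD ++ [PySem.Str.strip x]) (xs.map (fun raw => PySem.Str.strip raw))).filter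
                (fun t => PySem.Set.contains allowed t) := by
          simp [pvDedupFrom, hd, ha]
        have h' : ∀ u, u ∈ seen ↔
            (u ∈ allowed ∧ u ∈ seenD ++ [PySem.Str.strip x]) := by
          intro u
          by_cases hu : u = PySem.Str.strip x
          · subst hu
            have hs : PySem.Str.strip x ∉ seen := fun hmem => hd ((h _).mp hmem).2
            simp [ha, hs]
          · simp [hu, h u]
        rw [hstep, hdd]
        exact ih acc seen (seenD ++ [PySem.Str.strip x]) h'

-- ===== VERDICT (by name: the statement is the Claim_ definition above) =====
theorem normalize_version_catalog_tables_py_spec : Claim_equal_normalize_version_catalog_tables_py := by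
  intro source_tables _
  unfold Spec_normalize_version_catalog_tables_py
  cases source_tables with
  | none => rfl
  | some xs =>
    show (xs.foldl (pvStepA (PySem.Set.ofList VERSION_SOURCE_TABLES)) ([], PySem.Set.empty)).1 = _
    set stripped : List String := xs.map (fun raw => PySem.Str.strip raw) with hstr
    set allowed : PySem.Set String := PySem.Set.ofList VERSION_SOURCE_TABLES with hal
    set f : String → Nat × String := fun t => ((PySem.List.index? stripped t).getD 0, t) with hf
    set resultA : List String :=
      (pvDedupFrom [] stripped).filter (fun t => PySem.Set.contains allowed t) with hres
    have hA : (xs.foldl (pvStepA allowed) (([] : List String), PySem.Set.empty)).1 = resultA :=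
      (pvLoop_eq allowed xs [] [] [] (by intro u; simp)).trans (List.nil_append _)
    rw [hA]
    -- membership in resultA
    have hmemA : ∀ t, t ∈ resultA ↔ (t ∈ VERSION_SOURCE_TABLES ∧ t ∈ stripped) := by
      intro t
      rw [hres]
      simp [List.mem_filter, pvMem_dedupFrom, hal, and_comm]
    -- resultA has pairwise strictly increasing first-occurrence indices
    have hpwA : resultA.Pairwise (fun a b => pvIdx stripped a < pvIdx stripped b) :=
      (pvPairwise_dedupFrom stripped []).sublist List.filter_sublist
    have hndA : resultA.Nodup :=
      List.Pairwise.imp (fun hlt => by rintro rfl; omega) hpwA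
    have hndF : (VERSION_SOURCE_TABLES.filter (fun t => stripped.contains t)).Nodup :=
      (by decide : VERSION_SOURCE_TABLES.Nodup).filter _
    -- resultA is a permutation of the filtered allowed names
    have hperm : (resultA.map f).Perm
        ((VERSION_SOURCE_TABLES.filter (fun t => stripped.contains t)).map f) := by
      refine List.Perm.map f ?_
      refine (List.perm_ext_iff_of_nodup hndA hndF).mpr ?_
      intro t
      rw [hmemA t]
      simp [List.mem_filter]
    -- the mapped list is strictly increasing in the first component
    have hpw : (resultA.map f).Pairwise (fun p q => p.1 < q.1) := by
      rw [List.pairwise_map]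
      exact hpwA.imp (fun h => h)
    -- name the sorted order
    have hsorted : PySem.List.sorted
        ((VERSION_SOURCE_TABLES.filter (fun t => stripped.contains t)).map f)
        (fun p : Nat × String => p.1) false = resultA.map f :=
      PySem.List.sorted_eq_of_perm_of_pairwise_lt _ _ _ hperm hpw
    show resultA = (PySem.List.sorted
        ((VERSION_SOURCE_TABLES.filter (fun t => stripped.contains t)).map f)
        (fun p : Nat × String => p.1) false).map (fun p => p.2)
    rw [hsorted, List.map_map]
    exact (List.map_id'' (fun _ => rfl) resultA).symm
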